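-- pv_equiv track=rewrite | github.com/JulienGha/mental_disorders | mental_disorders.py | spot_negation
-- ===== SOURCE A (Python) =====
-- def spot_negation(text, counter):
--     # find the negation (supposed to work)
--     list_conj = ["further", "however", "moreover", "nevertheless", "contrary", "still",
--                  "yet", "bar", "barring", "except", "excepting", "excluding", "notwithstanding", "but"]
--     list_negation = ["no", "not", "never", "none", "nobody", "nothing", "neither", "nor", "without", "dont", "don't"]
--     negation = False
--     for i in range(counter):
--         word = text[i].lower()
--         if word in list_negation:
--             negation = True
--         if word in list_conj:
--             negation = False
--     return negation
-- ===== SOURCE B (Python) =====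
-- def spot_negation(text, counter):
--     list_conj = ["further", "however", "moreover", "nevertheless", "contrary", "still",
--                  "yet", "bar", "barring", "except", "excepting", "excluding", "notwithstanding", "but"]
--     list_negation = ["no", "not", "never", "none", "nobody", "nothing", "neither", "nor", "without", "dont", "don't"]
--     for i in range(counter - 1, -1, -1):
--         word = text[i].lower()
--         if word in list_negation:
--             return True
--         if word in list_conj:
--             return False
--     return False
-- ===== Notes on version B (the rewrite author's own statement) =====
-- stated objective: alternative
-- what changed: Replaces the forward scan that toggles a boolean through all counter words with a backward scan from index counter-1 that returns at the first negation or conjunction word found, so the state variable disappears and the loop exits early.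
import Mathlib
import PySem

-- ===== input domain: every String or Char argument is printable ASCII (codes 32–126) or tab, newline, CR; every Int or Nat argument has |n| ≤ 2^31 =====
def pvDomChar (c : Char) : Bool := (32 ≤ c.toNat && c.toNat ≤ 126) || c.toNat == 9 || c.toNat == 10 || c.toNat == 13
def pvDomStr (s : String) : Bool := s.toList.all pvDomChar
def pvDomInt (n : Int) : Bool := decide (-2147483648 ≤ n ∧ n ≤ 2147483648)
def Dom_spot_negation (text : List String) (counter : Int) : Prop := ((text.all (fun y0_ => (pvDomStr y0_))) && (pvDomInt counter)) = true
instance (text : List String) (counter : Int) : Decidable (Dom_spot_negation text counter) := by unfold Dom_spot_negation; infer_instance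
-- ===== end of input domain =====

-- B replaces A's forward toggle scan with a backward early-exit scan (same result, no state variable);
-- return-value equivalence on all inputs where A does not raise IndexError.

-- word lists (identical constants in both Pythons)
def pvListConj : List String :=
  ["further", "however", "moreover", "nevertheless", "contrary", "still",
   "yet", "bar", "barring", "except", "excepting", "excluding", "notwithstanding", "but"]
def pvListNegation : List String :=
  ["no", "not", "never", "none", "nobody", "nothing", "neither", "nor", "without", "dont", "don't"]

-- ===== PORT A =====
-- forward loop over range(counter) toggling the boolean `negation`
def spot_negation (text : List String) (counter : Int) : Bool :=
  (PySem.List.pyRange 0 counter 1).foldl (fun negation i =>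
    let word := PySem.Str.lower (PySem.List.pyGetD text i "")
    let negation := if pvListNegation.contains word then true else negation
    if pvListConj.contains word then false else negation) false

-- ===== PORT B =====
-- backward loop over range(counter-1, -1, -1); first matching word decides
def spotNegAltLoop (text : List String) : List Int → Bool
  | [] => false
  | i :: rest =>
    let word := PySem.Str.lower (PySem.List.pyGetD text i "")
    if pvListNegation.contains word then true
    else if pvListConj.contains word then false
    else spotNegAltLoop text rest

def spot_negation_alt (text : List String) (counter : Int) : Bool :=
  spotNegAltLoop text (PySem.List.pyRange (counter - 1) (-1) (-1))

-- ===== PRECONDITION & SPEC =====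
-- Pre_ excludes exactly the inputs where both Pythons raise IndexError (counter > len(text))
def Pre_spot_negation (text : List String) (counter : Int) : Prop := counter ≤ (text.length : Int)
instance (text : List String) (counter : Int) : Decidable (Pre_spot_negation text counter) := by unfold Pre_spot_negation; infer_instance
def pvWitness_spot_negation : List String × Int := (["He", "is", "NOT", "happy"], 3)

def Spec_spot_negation (text : List String) (counter : Int) (out : Bool) : Prop := out = spot_negation_alt text counter
instance (text : List String) (counter : Int) (out : Bool) : Decidable (Spec_spot_negation text counter out) := by unfold Spec_spot_negation; infer_instance

-- ===== CLAIM (what is proved, stated in full; the proofs are below) =====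
def Claim_equal_spot_negation : Prop := ∀ (text : List String) (counter : Int), Dom_spot_negation text counter → Pre_spot_negation text counter → Spec_spot_negation text counter (spot_negation text counter)

-- ===== LEMMAS AND PROOFS =====

-- the two word lists are disjoint
lemma pv_disjoint (w : String) (h : w ∈ pvListNegation) : w ∉ pvListConj := by
  simp [pvListNegation] at h
  rcases h with rfl|rfl|rfl|rfl|rfl|rfl|rfl|rfl|rfl|rfl|rfl <;> decide

-- backward early-exit scan over the reversed index list equals A's forward fold
lemma pv_rev_fold (text : List String) (l : List Int) :
    spotNegAltLoop text l.reverse =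
      l.foldl (fun negation i =>
        let word := PySem.Str.lower (PySem.List.pyGetD text i "")
        let negation := if pvListNegation.contains word then true else negation
        if pvListConj.contains word then false else negation) false := by
  induction l using List.reverseRecOn with
  | nil => rfl
  | append_singleton l i ih =>
    rw [List.foldl_append, List.reverse_append]
    simp only [List.reverse_singleton, List.singleton_append, List.foldl_cons, List.foldl_nil,
      spotNegAltLoop]
    set w := PySem.Str.lower (PySem.List.pyGetD text i "") with hw
    by_cases hn : w ∈ pvListNegation
    · simp [hn, pv_disjoint w hn]
    · by_cases hc : w ∈ pvListConj
      · simp [hn, hc]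
      · simp [hn, hc, ih]

-- ===== VERDICT (by name: the statement is the Claim_ definition above) =====
theorem spot_negation_spec : Claim_equal_spot_negation := by
  intro text counter _ _
  unfold Spec_spot_negation spot_negation spot_negation_alt
  have hr : PySem.List.pyRange (counter - 1) (-1) (-1) =
      (PySem.List.pyRange 0 counter 1).reverse := by
    rw [PySem.List.pyRange_neg_one_eq_reverse]
    norm_num
  rw [hr, pv_rev_fold]
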